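-- pv_equiv track=rewrite | github.com/k3uual/coding-problems | TakeUForward/a_to_z/Binary-Search/On_Ans/book_alloc.py | max_pages
-- ===== SOURCE A (Python) =====
-- def max_sum(a):
--     mx = a[0]
--     total = 0
--
--     for i in a:
--         if mx < i:
--             mx = i
--         total += i
--
--     return total, mx
--
-- def count_student(a, limit):
--     student = 1
--     page_stu = a[0]
--
--     for i in range(1,len(a)):
--         if(a[i] + page_stu > limit):
--             student += 1
--             page_stu = a[i]
--         else:
--             page_stu += a[i]
--
--     return student
--
-- def max_pages(a, stu):
--     high, low = max_sum(a)
--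
--     while(high >= low):
--         mid = (high + low)//2
--         mx = count_student(a, mid)
--
--         if(mx > m):
--             low = mid + 1
--         else:
--             high = mid - 1
--
--     return low
--
-- m = 4
-- ===== SOURCE B (Python) =====
-- # Same closed-interval bisection (its probe sequence is observable on inputs with
-- # negative page counts, where count feasibility is non-monotone), recast as pure
-- # recursion with builtin max/sum bounds and a closure-based fold counter.
-- m = 4
--
-- def max_pages(a, stu):
--     def students(limit):
--         count, load = 1, a[0]
--         for p in a[1:]:
--             if load + p > limit:
--                 count, load = count + 1, p
--             else:
--                 load += p
--         return count
--
--     def solve(lo, hi):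
--         if hi < lo:
--             return lo
--         mid = (lo + hi) // 2
--         if students(mid) > m:
--             return solve(mid + 1, hi)
--         return solve(lo, mid - 1)
--
--     return solve(max(a), sum(a))
-- ===== Notes on version B (the rewrite author's own statement) =====
-- stated objective: alternative
-- what changed: The closed-interval bisection's probe sequence is observable (student-count feasibility is non-monotone when the list has negative entries), so B keeps the same probes but is recast as a pure recursive search with builtin max()/sum() bounds and a closure-based fold counter, dropping the max_sum helper and the index loop.
import Mathlib
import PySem

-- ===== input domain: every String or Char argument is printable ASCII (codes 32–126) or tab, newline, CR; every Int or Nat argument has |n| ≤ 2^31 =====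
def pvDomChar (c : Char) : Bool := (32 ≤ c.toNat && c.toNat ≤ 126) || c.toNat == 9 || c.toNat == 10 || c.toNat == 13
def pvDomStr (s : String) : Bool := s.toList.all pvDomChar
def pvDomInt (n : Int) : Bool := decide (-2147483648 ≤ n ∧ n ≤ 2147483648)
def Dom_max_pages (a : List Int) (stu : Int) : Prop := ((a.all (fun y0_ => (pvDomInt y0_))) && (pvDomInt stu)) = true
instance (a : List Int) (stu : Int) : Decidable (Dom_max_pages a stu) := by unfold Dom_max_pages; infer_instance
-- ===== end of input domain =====

-- B keeps A's exact bisection probes (observable on negative entries) but is a pure recursive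
-- search with builtin max/sum bounds and a fold counter; equivalence is about the return value.

-- ===== PORT A =====
-- max_sum: returns (total, mx); a[0] on [] raises IndexError (excluded by Pre_), ported with default 0.
def pvMaxSumA (a : List Int) : Int × Int :=
  let s := a.foldl (fun (p : Int × Int) i =>
      ((if p.1 < i then i else p.1), p.2 + i))
    (PySem.List.pyGetD a 0 0, 0)
  (s.2, s.1)

-- count_student: index loop over range(1, len(a)); a[i] is in range, pyGetD default unreachable.
def pvCountStudentA (a : List Int) (limit : Int) : Int :=
  ((PySem.List.pyRange 1 (a.length : Int) 1).foldl
      (fun (s : Int × Int) i =>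
        if PySem.List.pyGetD a i 0 + s.2 > limit then (s.1 + 1, PySem.List.pyGetD a i 0)
        else (s.1, s.2 + PySem.List.pyGetD a i 0))
      (1, PySem.List.pyGetD a 0 0)).1

-- the while-loop of max_pages, state (high, low); global m = 4
def pvLoopA (a : List Int) (high low : Int) : Int :=
  if h : high ≥ low then
    let mid := PySem.Int.floordiv (high + low) 2
    if pvCountStudentA a mid > 4 then pvLoopA a high (mid + 1)
    else pvLoopA a (mid - 1) low
  else low
termination_by (high - low + 1).toNat
decreasing_by
  · have := PySem.Int.floordiv_two_mid_bounds (lo := low) (hi := high) (by omega)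
    rw [Int.add_comm] at this; omega
  · have := PySem.Int.floordiv_two_mid_bounds (lo := low) (hi := high) (by omega)
    rw [Int.add_comm] at this; omega

def max_pages (a : List Int) (stu : Int) : Int :=
  let hl := pvMaxSumA a
  pvLoopA a hl.1 hl.2

-- ===== PORT B =====
-- students(limit): fold over a[1:] with state (count, load); a[0] via pyGetD (=[] excluded by Pre_).
def pvStudentsB (a : List Int) (limit : Int) : Int :=
  ((a.drop 1).foldl
      (fun (s : Int × Int) p =>
        if s.2 + p > limit then (s.1 + 1, p) else (s.1, s.2 + p))
      (1, PySem.List.pyGetD a 0 0)).1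

def pvSolveB (a : List Int) (lo hi : Int) : Int :=
  if h : hi < lo then lo
  else
    let mid := PySem.Int.floordiv (lo + hi) 2
    if pvStudentsB a mid > 4 then pvSolveB a (mid + 1) hi
    else pvSolveB a lo (mid - 1)
termination_by (hi - lo + 1).toNat
decreasing_by
  · have := PySem.Int.floordiv_two_mid_bounds (lo := lo) (hi := hi) (by omega)
    omega
  · have := PySem.Int.floordiv_two_mid_bounds (lo := lo) (hi := hi) (by omega)
    omega

def max_pages_alt (a : List Int) (stu : Int) : Int :=
  pvSolveB a ((PySem.List.max? a (fun y => y)).getD 0) a.sum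

-- ===== PRECONDITION & SPEC =====
-- A raises IndexError on the empty list (a[0]); B raises ValueError there (max of empty).
def Pre_max_pages (a : List Int) (stu : Int) : Prop := a ≠ []
instance (a : List Int) (stu : Int) : Decidable (Pre_max_pages a stu) := by
  unfold Pre_max_pages; infer_instance

def pvWitness_max_pages : List Int × Int := ([12, 34, 67, 90, 5], 2)

def Spec_max_pages (a : List Int) (stu : Int) (out : Int) : Prop := out = max_pages_alt a stu
instance (a : List Int) (stu : Int) (out : Int) : Decidable (Spec_max_pages a stu out) := by
  unfold Spec_max_pages; infer_instance

-- ===== CLAIM (what is proved, stated in full; the proofs are below) =====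
def Claim_equal_max_pages : Prop := ∀ (a : List Int) (stu : Int), Dom_max_pages a stu → Pre_max_pages a stu → Spec_max_pages a stu (max_pages a stu)

-- ===== LEMMAS AND PROOFS =====

-- the two student counters agree
lemma pv_count_eq (a : List Int) (limit : Int) :
    pvCountStudentA a limit = pvStudentsB a limit := by
  unfold pvCountStudentA pvStudentsB
  rw [PySem.List.foldl_pyRange_pyGetD' a 0
        (fun (s : Int × Int) (v : Int) =>
          if v + s.2 > limit then (s.1 + 1, v) else (s.1, s.2 + v))
        (1, PySem.List.pyGetD a 0 0) (by omega)]
  have hb : (fun (s : Int × Int) (v : Int) =>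
          if v + s.2 > limit then (s.1 + 1, v) else (s.1, s.2 + v))
      = (fun (s : Int × Int) (p : Int) =>
          if s.2 + p > limit then (s.1 + 1, p) else (s.1, s.2 + p)) := by
    funext s p
    rw [Int.add_comm p s.2]
  rw [hb]
  rfl

-- the two searches agree: strong induction on the interval width
lemma pv_loop_eq_aux (a : List Int) (n : Nat) :
    ∀ high low : Int, (high - low + 1).toNat = n → pvLoopA a high low = pvSolveB a low high := by
  induction n using Nat.strong_induction_on with
  | _ n ih =>
    intro high low hn
    rw [pvLoopA, pvSolveB]
    by_cases h : high ≥ low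
    · have hm := PySem.Int.floordiv_two_mid_bounds (lo := low) (hi := high) h
      rw [dif_pos h, dif_neg (by omega)]
      show (if pvCountStudentA a (PySem.Int.floordiv (high + low) 2) > 4
            then pvLoopA a high (PySem.Int.floordiv (high + low) 2 + 1)
            else pvLoopA a (PySem.Int.floordiv (high + low) 2 - 1) low)
          = (if pvStudentsB a (PySem.Int.floordiv (low + high) 2) > 4
            then pvSolveB a (PySem.Int.floordiv (low + high) 2 + 1) high
            else pvSolveB a low (PySem.Int.floordiv (low + high) 2 - 1))
      rw [Int.add_comm high low, pv_count_eq]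
      set mid := PySem.Int.floordiv (low + high) 2 with hmid
      by_cases hc : pvStudentsB a mid > 4
      · rw [if_pos hc, if_pos hc]
        exact ih _ (by omega) high (mid + 1) rfl
      · rw [if_neg hc, if_neg hc]
        exact ih _ (by omega) (mid - 1) low rfl
    · rw [dif_neg h, dif_pos (by omega)]

lemma pv_loop_eq (a : List Int) (high low : Int) :
    pvLoopA a high low = pvSolveB a low high :=
  pv_loop_eq_aux a _ high low rfl

-- bounds agree
lemma pv_fold_snd (l : List Int) :
    ∀ m0 t0 : Int,
      (l.foldl (fun (p : Int × Int) i => ((if p.1 < i then i else p.1), p.2 + i)) (m0, t0)).2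
        = t0 + l.sum := by
  induction l with
  | nil => intro m0 t0; simp
  | cons x xs ih => intro m0 t0; simp only [List.foldl_cons, List.sum_cons, ih]; ring

lemma pv_fold_fst (l : List Int) :
    ∀ m0 t0 : Int,
      (l.foldl (fun (p : Int × Int) i => ((if p.1 < i then i else p.1), p.2 + i)) (m0, t0)).1
        = l.foldl max m0 := by
  induction l with
  | nil => intro m0 t0; simp
  | cons x xs ih =>
    intro m0 t0
    simp only [List.foldl_cons, ih]
    congr 1
    omega

lemma pv_bounds_eq (a : List Int) (h : a ≠ []) :
    pvMaxSumA a = (a.sum, (PySem.List.max? a (fun y => y)).getD 0) := by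
  obtain ⟨x, xs, rfl⟩ := List.exists_cons_of_ne_nil h
  unfold pvMaxSumA
  simp only [PySem.List.pyGetD_zero_cons]
  rw [PySem.List.max?_id_cons]
  refine Prod.ext ?_ ?_
  · simpa using pv_fold_snd (x :: xs) x 0
  · have := pv_fold_fst (x :: xs) x 0
    simp only [List.foldl_cons, max_self] at this ⊢
    simpa [max_self] using this

-- ===== VERDICT (by name: the statement is the Claim_ definition above) =====
theorem max_pages_spec : Claim_equal_max_pages := by
  intro a stu _ hpre
  unfold Spec_max_pages max_pages max_pages_alt
  rw [pv_bounds_eq a hpre, pv_loop_eq]
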